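-- pv_equiv track=rewrite | github.com/Samkanja/advent-of-code | 2023/day4/main.py | func
-- ===== SOURCE A (Python) =====
-- def func(x:int):
--     total = 1
--     if not x:
--         return 0
--     else:
--         for i in range(len(x)):
--             if i >= 1:
--                 total *=2
--         else:
--             return total
-- ===== SOURCE B (Python) =====
-- def func(x: int):
--     if not x:
--         return 0
--     return 1 << (len(x) - 1)
-- ===== Notes on version B (the rewrite author's own statement) =====
-- stated objective: simpler
-- what changed: Replaced the counting loop that doubles an accumulator for each index >= 1 with a single closed-form shift 1 << (len(x)-1).
import Mathlib
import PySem

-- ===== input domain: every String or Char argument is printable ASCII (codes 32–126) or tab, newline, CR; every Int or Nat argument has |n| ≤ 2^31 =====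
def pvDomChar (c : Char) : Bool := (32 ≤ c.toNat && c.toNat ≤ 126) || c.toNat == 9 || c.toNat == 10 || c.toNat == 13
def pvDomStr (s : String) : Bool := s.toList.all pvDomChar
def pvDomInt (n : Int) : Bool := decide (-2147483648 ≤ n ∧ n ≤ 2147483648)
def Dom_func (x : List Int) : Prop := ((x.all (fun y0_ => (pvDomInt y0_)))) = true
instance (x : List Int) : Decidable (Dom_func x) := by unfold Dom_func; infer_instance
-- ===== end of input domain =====

-- B replaces A's per-index doubling loop with the closed form 1 <<< (len-1); same empty-list guard.

-- ===== PORT A =====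
def func (x : List Int) : Int :=
  let total : Int := 1
  if x.isEmpty then 0
  else
    (PySem.List.pyRange 0 (x.length : Int) 1).foldl
      (fun total i => if i ≥ 1 then total * 2 else total) total

-- ===== PORT B =====
def func_alt (x : List Int) : Int :=
  if x.isEmpty then 0 else (1 : Int) <<< (x.length - 1)

-- ===== PRECONDITION & SPEC =====
def Spec_func (x : List Int) (out : Int) : Prop := out = func_alt x
instance (x : List Int) (out : Int) : Decidable (Spec_func x out) := by unfold Spec_func; infer_instance

-- ===== CLAIM (what is proved, stated in full; the proofs are below) =====
def Claim_equal_func : Prop := ∀ (x : List Int), Dom_func x → Spec_func x (func x)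

-- ===== LEMMAS AND PROOFS =====

lemma func_foldl_range (n : ℕ) (hn : 1 ≤ n) :
    (PySem.List.pyRange 0 (n : Int) 1).foldl
      (fun total i => if i ≥ 1 then total * 2 else total) (1 : Int)
      = (2 : Int) ^ (n - 1) := by
  induction n with
  | zero => omega
  | succ m ih =>
    have hc : ((m:Int)+1) = (m:Int) + 1 := rfl
    push_cast
    rw [PySem.List.pyRange_one_succ_right (by positivity), List.foldl_append]
    rcases Nat.eq_zero_or_pos m with hm | hm
    · subst hm; simp [PySem.List.pyRange]
    · rw [ih hm]
      have : ((m : Int) ≥ 1) := by exact_mod_cast hm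
      simp only [List.foldl, if_pos this]
      have h1 : m - 1 + 1 = m := by omega
      rw [← pow_succ, h1]

-- ===== VERDICT (by name: the statement is the Claim_ definition above) =====
theorem func_spec : Claim_equal_func := by
  intro x _
  unfold Spec_func func func_alt
  rcases x with _ | ⟨a, xs⟩
  · simp
  · simp only [List.isEmpty_cons, if_false, Bool.false_eq_true]
    rw [func_foldl_range ((a :: xs).length) (by simp)]
    have : (1 : Int) <<< ((a :: xs).length - 1) = 2 ^ ((a :: xs).length - 1) := by
      simp [Int.shiftLeft_eq, Int.one_shiftLeft]
    rw [this]
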